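-- pv_equiv track=rewrite | github.com/ABOY-IA/zorglangue_projet | components/functions.py | inverser_mot
-- ===== SOURCE A (Python) =====
-- def inverser_mot(mot):
--     lettres = [char for char in mot if char.isalpha()]
--     lettres_inverses = lettres[::-1]
--     resultat = []
--
--     for i, char in enumerate(mot):
--         if char.isalpha():
--             inversed_char = lettres_inverses.pop(0)
--             if char.isupper():
--                 resultat.append(inversed_char.upper())
--             else:
--                 resultat.append(inversed_char.lower())
--         else:
--             resultat.append(char)
--
--     return ''.join(resultat)
-- ===== SOURCE B (Python) =====
-- def inverser_mot(mot):
--     # Two-pointer in-place swap: walk in from both ends, swapping alphabetic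
--     # characters and giving each letter the case of its landing slot.
--     arr = list(mot)
--     i, j = 0, len(arr) - 1
--     while i < j:
--         if not arr[i].isalpha():
--             i += 1
--         elif not arr[j].isalpha():
--             j -= 1
--         else:
--             ci, cj = arr[i], arr[j]
--             arr[i] = cj.upper() if ci.isupper() else cj.lower()
--             arr[j] = ci.upper() if cj.isupper() else ci.lower()
--             i += 1
--             j -= 1
--     return ''.join(arr)
-- ===== Notes on version B (the rewrite author's own statement) =====
-- stated objective: alternative
-- what changed: Replaces A's extract-filter/reverse/pop(0)-reconsume pass with a single symmetric two-pointer in-place swap over the character array, re-casing each swapped letter by its landing slot's original case.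
import Mathlib
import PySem

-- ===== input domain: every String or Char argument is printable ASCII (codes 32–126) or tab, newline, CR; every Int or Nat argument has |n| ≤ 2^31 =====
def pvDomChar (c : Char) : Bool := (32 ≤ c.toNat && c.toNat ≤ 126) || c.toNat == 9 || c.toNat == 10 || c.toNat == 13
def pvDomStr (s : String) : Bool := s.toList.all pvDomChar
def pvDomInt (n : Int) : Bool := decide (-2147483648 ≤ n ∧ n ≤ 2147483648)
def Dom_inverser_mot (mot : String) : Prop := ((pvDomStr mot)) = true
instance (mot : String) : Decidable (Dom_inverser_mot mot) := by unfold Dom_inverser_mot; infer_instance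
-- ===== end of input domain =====

-- B replaces A's extract/reverse/pop(0)-reconsume pass with a single two-pointer
-- in-place swap, re-casing each swapped letter by its landing slot (objective: alternative algorithm).

-- shared one-liner: exactly both Pythons' `x.upper() if o.isupper() else x.lower()`
def pvRecase (o x : Char) : Char :=
  if PySem.Chars.isupper o then PySem.Chars.upperChar x else PySem.Chars.lowerChar x

-- ===== PORT A =====
-- the `for i, char in enumerate(mot)` loop, carrying `lettres_inverses` as `rem`
def pvALoop : List Char → List Char → List Char
  | [], _ => []
  | c :: cs, rem =>
    if PySem.Chars.isalpha c then
      match PySem.List.pop? rem 0 with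
      | some (r, rs) => pvRecase c r :: pvALoop cs rs
      | none => []   -- Python's pop(0) raises IndexError here; unreachable (rem holds one letter per remaining alphabetic char)
    else c :: pvALoop cs rem

def inverser_mot (mot : String) : String :=
  let lettres := mot.toList.filter PySem.Chars.isalpha
  let lettres_inverses := (PySem.List.slice? lettres none none (-1)).getD []  -- lettres[::-1]
  String.ofList (pvALoop mot.toList lettres_inverses)

-- ===== PORT B =====
-- the `while i < j` loop of Source B over the character array
def pvBLoop (arr : List Char) (i j : Nat) : List Char :=
  if _h : i < j then
    let ci := arr.getD i ' '
    let cj := arr.getD j ' '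
    if ¬ PySem.Chars.isalpha ci then pvBLoop arr (i+1) j
    else if ¬ PySem.Chars.isalpha cj then pvBLoop arr i (j-1)
    else pvBLoop ((arr.set i (pvRecase ci cj)).set j (pvRecase cj ci)) (i+1) (j-1)
  else arr
termination_by j - i
decreasing_by all_goals omega

def inverser_mot_alt (mot : String) : String :=
  let arr := mot.toList
  String.ofList (pvBLoop arr 0 (arr.length - 1))

-- ===== PRECONDITION & SPEC =====
def Spec_inverser_mot (mot : String) (out : String) : Prop := out = inverser_mot_alt mot
instance (mot : String) (out : String) : Decidable (Spec_inverser_mot mot out) := by unfold Spec_inverser_mot; infer_instance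

-- ===== CLAIM (what is proved, stated in full; the proofs are below) =====
def Claim_equal_inverser_mot : Prop := ∀ (mot : String), Dom_inverser_mot mot → Spec_inverser_mot mot (inverser_mot mot)

-- ===== LEMMAS AND PROOFS =====

-- rank of position p: number of alphabetic characters strictly before p
def pvRk (m : List Char) (p : Nat) : Nat := (m.take p).countP PySem.Chars.isalpha

-- the common target: character at position p of the result of either program
def pvSpecAt (m : List Char) (p : Nat) : Char :=
  if PySem.Chars.isalpha (m.getD p ' ') then
    pvRecase (m.getD p ' ')
      ((m.filter PySem.Chars.isalpha).getD
        ((m.filter PySem.Chars.isalpha).length - 1 - pvRk m p) ' ')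
  else m.getD p ' '

theorem pvRecase_self {c : Char} (h : PySem.Chars.isalpha c = true) : pvRecase c c = c := by
  simp only [PySem.Chars.isalpha, Bool.or_eq_true] at h
  unfold pvRecase PySem.Chars.upperChar PySem.Chars.lowerChar
  rcases h with h | h <;>
    simp only [PySem.Chars.isupper, PySem.Chars.islower, Char.le_def, decide_eq_true_eq,
      Bool.and_eq_true, UInt32.le_iff_toNat_le] at * <;>
    split_ifs <;> simp_all <;> omega

theorem pvRk_zero (m : List Char) : pvRk m 0 = 0 := by simp [pvRk]

theorem pvRk_cons (c : Char) (cs : List Char) (q : Nat) :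
    pvRk (c :: cs) (q + 1) = pvRk cs q + (if PySem.Chars.isalpha c then 1 else 0) := by
  simp [pvRk, List.take_succ_cons, List.countP_cons]

theorem pvRk_succ {m : List Char} {i : Nat} (hi : i < m.length) :
    pvRk m (i + 1) = pvRk m i + (if PySem.Chars.isalpha (m.getD i ' ') then 1 else 0) := by
  unfold pvRk
  rw [List.take_add_one, List.getElem?_eq_getElem hi]
  simp only [Option.toList_some, List.countP_append, List.countP_cons, List.countP_nil,
    List.getD_eq_getElem _ _ hi]
  omega

-- count decomposition at a position p < m.length
theorem pvCount_split {m : List Char} {p : Nat} (hp : p < m.length) :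
    (m.filter PySem.Chars.isalpha).length
      = pvRk m p + (if PySem.Chars.isalpha (m.getD p ' ') then 1 else 0)
        + (m.drop (p+1)).countP PySem.Chars.isalpha := by
  have h2 : m.drop p = m[p] :: m.drop (p+1) := List.drop_eq_getElem_cons hp
  rw [← List.countP_eq_length_filter]
  conv_lhs => rw [← List.take_append_drop p m]
  rw [List.countP_append, h2, List.countP_cons, List.getD_eq_getElem _ _ hp]
  unfold pvRk; omega

theorem pvRk_lt {m : List Char} {p : Nat} (hp : p < m.length)
    (ha : PySem.Chars.isalpha (m.getD p ' ') = true) :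
    pvRk m p < (m.filter PySem.Chars.isalpha).length := by
  have := pvCount_split hp
  rw [ha] at this
  simp at this
  omega

theorem pvFilter_getD_rk {m : List Char} {p : Nat} (hp : p < m.length)
    (ha : PySem.Chars.isalpha (m.getD p ' ') = true) :
    (m.filter PySem.Chars.isalpha).getD (pvRk m p) ' ' = m.getD p ' ' := by
  have h2 : m.drop p = m[p] :: m.drop (p+1) := List.drop_eq_getElem_cons hp
  have hg : m.getD p ' ' = m[p] := List.getD_eq_getElem _ _ hp
  have hfil : m.filter PySem.Chars.isalpha
      = (m.take p).filter PySem.Chars.isalpha ++ (m.drop p).filter PySem.Chars.isalpha := by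
    conv_lhs => rw [← List.take_append_drop p m]
    rw [List.filter_append]
  rw [hfil]
  have hlen : (List.filter PySem.Chars.isalpha (m.take p)).length = pvRk m p := by
    rw [← List.countP_eq_length_filter]; rfl
  rw [List.getD_append_right _ _ _ _ (le_of_eq hlen), hlen, Nat.sub_self, h2,
    List.filter_cons, hg]
  rw [hg] at ha
  rw [if_pos ha]
  rfl

theorem pvPop_cons (x : Char) (xs : List Char) : PySem.List.pop? (x :: xs) 0 = some (x, xs) := by
  simp [PySem.List.pop?, PySem.List.pyIdx?]

theorem pvALoop_length : ∀ (cs rem : List Char),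
    cs.countP PySem.Chars.isalpha ≤ rem.length → (pvALoop cs rem).length = cs.length := by
  intro cs
  induction cs with
  | nil => intro rem _; rfl
  | cons c cs ih =>
    intro rem h
    rw [List.countP_cons] at h
    unfold pvALoop
    by_cases hc : PySem.Chars.isalpha c
    · rw [if_pos hc] at h ⊢
      obtain ⟨r, rs, rfl⟩ : ∃ r rs, rem = r :: rs := by
        cases rem with
        | nil => simp at h
        | cons r rs => exact ⟨r, rs, rfl⟩
      rw [pvPop_cons]
      simp only [List.length_cons]
      rw [ih rs (by simp at h; omega)]
    · rw [if_neg hc] at h ⊢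
      simp only [List.length_cons]
      rw [ih rem (by omega)]

theorem pvALoop_getD : ∀ (cs rem : List Char) (p : Nat),
    cs.countP PySem.Chars.isalpha ≤ rem.length → p < cs.length →
    (pvALoop cs rem).getD p ' '
      = if PySem.Chars.isalpha (cs.getD p ' ') then
          pvRecase (cs.getD p ' ') (rem.getD (pvRk cs p) ' ')
        else cs.getD p ' ' := by
  intro cs
  induction cs with
  | nil => intro rem p _ hp; simp at hp
  | cons c cs ih =>
    intro rem p h hp
    rw [List.countP_cons] at h
    unfold pvALoop
    by_cases hc : PySem.Chars.isalpha c
    · rw [if_pos hc] at h ⊢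
      obtain ⟨r, rs, rfl⟩ : ∃ r rs, rem = r :: rs := by
        cases rem with
        | nil => simp at h
        | cons r rs => exact ⟨r, rs, rfl⟩
      rw [pvPop_cons]
      cases p with
      | zero => simp [pvRk_zero, hc]
      | succ q =>
        simp only [List.getD_cons_succ, pvRk_cons, if_pos hc]
        rw [ih rs q (by simp at h; omega) (by simpa using hp)]
    · rw [if_neg hc] at h ⊢
      cases p with
      | zero => simp [hc]
      | succ q =>
        simp only [List.getD_cons_succ, pvRk_cons, if_neg hc, Nat.add_zero]
        rw [ih rem q (by omega) (by simpa using hp)]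

theorem pvGetD_set {l : List Char} {i p : Nat} {a d : Char} :
    (l.set i a).getD p d = if i = p ∧ i < l.length then a else l.getD p d := by
  simp only [List.getD_eq_getElem?_getD, List.getElem?_set]
  by_cases h1 : i = p
  · subst h1
    by_cases h2 : i < l.length
    · simp [h2]
    · simp [h2]
  · simp [h1]

theorem pvBLoop_length : ∀ (arr : List Char) (i j : Nat), (pvBLoop arr i j).length = arr.length := by
  intro arr i j
  fun_induction pvBLoop arr i j <;> simp_all [List.length_set]

theorem pvBLoop_getD (m : List Char) : ∀ (arr : List Char) (i j : Nat),
    arr.length = m.length → j < m.length →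
    pvRk m i = (m.drop (j+1)).countP PySem.Chars.isalpha →
    (∀ p, p < m.length → (p < i ∨ j < p) → arr.getD p ' ' = pvSpecAt m p) →
    (∀ p, i ≤ p → p ≤ j → arr.getD p ' ' = m.getD p ' ') →
    ∀ p, p < m.length → (pvBLoop arr i j).getD p ' ' = pvSpecAt m p := by
  intro arr i j
  fun_induction pvBLoop arr i j with
  | case1 arr i j h ci hci ih =>
    intro hlen hj hcnt hout hin p hp
    have hi : i < m.length := by omega
    have hmi : arr.getD i ' ' = m.getD i ' ' := hin i le_rfl (by omega)
    have hci' : ¬ PySem.Chars.isalpha (arr.getD i ' ') = true := hci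
    have hnalpha : ¬ PySem.Chars.isalpha (m.getD i ' ') = true := by
      rw [← hmi]; exact hci'
    refine ih hlen hj ?_ ?_ ?_ p hp
    · rw [pvRk_succ hi, if_neg hnalpha, Nat.add_zero]; exact hcnt
    · intro q hq hcase
      rcases hcase with hq2 | hq2
      · by_cases hqi : q = i
        · subst hqi
          rw [hin q le_rfl (by omega)]
          unfold pvSpecAt
          rw [if_neg hnalpha]
        · exact hout q hq (Or.inl (by omega))
      · exact hout q hq (Or.inr hq2)
    · intro q hq1 hq2; exact hin q (by omega) hq2
  | case2 arr i j h ci cj hci hcj ih =>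
    intro hlen hj hcnt hout hin p hp
    have hmj : arr.getD j ' ' = m.getD j ' ' := hin j (by omega) le_rfl
    have hcj' : ¬ PySem.Chars.isalpha (arr.getD j ' ') = true := hcj
    have hnalpha : ¬ PySem.Chars.isalpha (m.getD j ' ') = true := by
      rw [← hmj]; exact hcj'
    refine ih hlen (by omega) ?_ ?_ ?_ p hp
    · have hdrop : m.drop j = m[j] :: m.drop (j+1) := List.drop_eq_getElem_cons hj
      have hj1 : (j - 1) + 1 = j := by omega
      rw [hj1, hdrop, List.countP_cons]
      rw [List.getD_eq_getElem _ _ hj] at hnalpha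
      rw [if_neg hnalpha]
      omega
    · intro q hq hcase
      rcases hcase with hq2 | hq2
      · exact hout q hq (Or.inl hq2)
      · by_cases hqj : q = j
        · subst hqj
          rw [hin q (by omega) le_rfl]
          unfold pvSpecAt
          rw [if_neg hnalpha]
        · exact hout q hq (Or.inr (by omega))
    · intro q hq1 hq2; exact hin q hq1 (by omega)
  | case3 arr i j h ci cj hci hcj ih =>
    intro hlen hj hcnt hout hin p hp
    have hi : i < m.length := by omega
    have hmi : arr.getD i ' ' = m.getD i ' ' := hin i le_rfl (by omega)
    have hmj : arr.getD j ' ' = m.getD j ' ' := hin j (by omega) le_rfl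
    have hci' : ¬ ¬ PySem.Chars.isalpha (arr.getD i ' ') = true := hci
    have hcj' : ¬ ¬ PySem.Chars.isalpha (arr.getD j ' ') = true := hcj
    have hai : PySem.Chars.isalpha (m.getD i ' ') = true := by
      rw [← hmi]; exact not_not.mp hci'
    have haj : PySem.Chars.isalpha (m.getD j ' ') = true := by
      rw [← hmj]; exact not_not.mp hcj'
    have hsplitj := pvCount_split hj
    rw [if_pos haj] at hsplitj
    have hLi := pvFilter_getD_rk hi hai
    have hLj := pvFilter_getD_rk hj haj
    have hil : i < arr.length := by omega
    have hjl : j < arr.length := by omega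
    have hset : ∀ q, ((arr.set i (pvRecase (arr.getD i ' ') (arr.getD j ' '))).set j
          (pvRecase (arr.getD j ' ') (arr.getD i ' '))).getD q ' '
        = if q = j then pvRecase (arr.getD j ' ') (arr.getD i ' ')
          else if q = i then pvRecase (arr.getD i ' ') (arr.getD j ' ')
          else arr.getD q ' ' := by
      intro q
      rw [pvGetD_set]
      simp only [List.length_set]
      by_cases hqj : q = j
      · rw [if_pos ⟨hqj.symm, by omega⟩, if_pos hqj]
      · rw [if_neg (fun hh => hqj hh.1.symm), if_neg hqj, pvGetD_set]
        by_cases hqi : q = i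
        · rw [if_pos ⟨hqi.symm, hil⟩, if_pos hqi]
        · rw [if_neg (fun hh => hqi hh.1.symm), if_neg hqi]
    refine ih ?_ (by omega) ?_ ?_ ?_ p hp
    · simp [List.length_set, hlen]
    · have hdrop : m.drop j = m[j] :: m.drop (j+1) := List.drop_eq_getElem_cons hj
      have hj1 : (j - 1) + 1 = j := by omega
      rw [pvRk_succ hi, if_pos hai, hj1, hdrop, List.countP_cons]
      have haj' := haj
      rw [List.getD_eq_getElem _ _ hj] at haj'
      rw [if_pos haj']
      omega
    · intro q hq hcase
      rw [hset q]
      by_cases hqj : q = j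
      · rw [if_pos hqj, hqj]
        unfold pvSpecAt
        rw [if_pos haj]
        have heq : (m.filter PySem.Chars.isalpha).length - 1 - pvRk m j
            = (m.drop (j+1)).countP PySem.Chars.isalpha := by omega
        rw [heq, ← hcnt, hLi, hmi, hmj]
      · rw [if_neg hqj]
        by_cases hqi : q = i
        · rw [if_pos hqi, hqi]
          unfold pvSpecAt
          rw [if_pos hai]
          have heq : (m.filter PySem.Chars.isalpha).length - 1 - pvRk m i = pvRk m j := by
            rw [hcnt]; omega
          rw [heq, hLj, hmi, hmj]
        · rw [if_neg hqi]
          exact hout q hq (by omega)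
    · intro q hq1 hq2
      rw [hset q, if_neg (by omega), if_neg (by omega)]
      exact hin q (by omega) (by omega)
  | case4 arr i j h =>
    intro hlen hj hcnt hout hin p hp
    by_cases hcase : p < i ∨ j < p
    · exact hout p hp hcase
    · have hpi : p = i := by omega
      have hpj : p = j := by omega
      rw [hin p (le_of_eq hpi.symm) (le_of_eq hpj)]
      rw [hpi.symm] at hcnt
      rw [hpj.symm] at hcnt
      unfold pvSpecAt
      by_cases ha : PySem.Chars.isalpha (m.getD p ' ') = true
      · rw [if_pos ha]
        have hsplit := pvCount_split hp
        rw [if_pos ha] at hsplit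
        have heq : (m.filter PySem.Chars.isalpha).length - 1 - pvRk m p = pvRk m p := by
          omega
        rw [heq, pvFilter_getD_rk hp ha, pvRecase_self ha]
      · rw [if_neg ha]

theorem pvRev_getD {L : List Char} {k : Nat} (hk : k < L.length) :
    L.reverse.getD k ' ' = L.getD (L.length - 1 - k) ' ' := by
  have h1 : k < L.reverse.length := by simpa using hk
  rw [List.getD_eq_getElem _ _ h1, List.getElem_reverse,
    List.getD_eq_getElem _ _ (by omega)]

-- ===== VERDICT (by name: the statement is the Claim_ definition above) =====
theorem inverser_mot_spec : Claim_equal_inverser_mot := by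
  intro mot _
  unfold Spec_inverser_mot inverser_mot inverser_mot_alt
  simp only [PySem.List.slice?_none_none_neg_one, Option.getD_some]
  set m := mot.toList with hm
  congr 1
  have hcnt : m.countP PySem.Chars.isalpha
      ≤ (m.filter PySem.Chars.isalpha).reverse.length := by
    simp [← List.countP_eq_length_filter]
  apply List.ext_getElem
  · rw [pvALoop_length _ _ hcnt, pvBLoop_length]
  · intro p h1 h2
    have hp : p < m.length := by rw [pvALoop_length _ _ hcnt] at h1; exact h1
    rw [← List.getD_eq_getElem _ ' ' h1, ← List.getD_eq_getElem _ ' ' h2]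
    rw [pvALoop_getD _ _ _ hcnt hp]
    have hB : (pvBLoop m 0 (m.length - 1)).getD p ' ' = pvSpecAt m p := by
      refine pvBLoop_getD m m 0 (m.length - 1) rfl (by omega) ?_ ?_ ?_ p hp
      · have : m.length - 1 + 1 = m.length := by omega
        rw [pvRk_zero, this]
        simp
      · intro q hq hcase; omega
      · intro q _ _; rfl
    rw [hB]
    unfold pvSpecAt
    by_cases ha : PySem.Chars.isalpha (m.getD p ' ') = true
    · rw [if_pos ha, if_pos ha, pvRev_getD (pvRk_lt hp ha)]
    · rw [if_neg ha, if_neg ha]
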